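-- pv_equiv track=rewrite | github.com/proftodd/Advent_of_Code | 2019/14/chemistry.py | combine_terms
-- ===== SOURCE A (Python) =====
-- def combine_terms(rcts_1, rcts_2, byps_1=None):
--     new_rcts = {}
--     new_byps = {} if byps_1 is None else {b: byps_1[b] for b in byps_1}
--     for rct in rcts_1:
--         new_rcts[rct] = rcts_1[rct] + rcts_2.get(rct, 0)
--     for rct in rcts_2:
--         if rct not in new_rcts:
--             new_rcts[rct] = rcts_2[rct]
--     for r in list(iter(new_rcts)):
--         if r in list(iter(new_byps)):
--             if new_rcts[r] > new_byps[r]: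
--                 new_rcts[r] = new_rcts[r] - new_byps[r]
--                 del(new_byps[r])
--             elif new_rcts[r] < new_byps[r]:
--                 new_byps[r] = new_byps[r] - new_rcts[r]
--                 del(new_rcts[r])
--             else:
--                 del(new_rcts[r])
--                 del(new_byps[r])
--     return new_rcts, new_byps
-- ===== SOURCE B (Python) =====
-- def combine_terms(rcts_1, rcts_2, byps_1=None):
--     byps = {} if byps_1 is None else byps_1
--
--     def m(k):
--         return rcts_1.get(k, 0) + rcts_2.get(k, 0)
--
--     rct_keys = list(rcts_1) + [k for k in rcts_2 if k not in rcts_1]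
--     new_rcts = {k: m(k) - byps.get(k, 0)
--                 for k in rct_keys
--                 if k not in byps or m(k) > byps[k]}
--     new_byps = {k: v - m(k)
--                 for k, v in byps.items()
--                 if (k not in rcts_1 and k not in rcts_2) or v > m(k)}
--     return new_rcts, new_byps
-- ===== Notes on version B (the rewrite author's own statement) =====
-- stated objective: simpler
-- what changed: A stages four mutating passes (copy byps, build a merged dict in two loops, then a cancellation loop that updates and del-etes keys from both dicts, rescanning a rebuilt key list for membership); B builds no intermediate dict and mutates nothing: it streams the merged key order (rcts_1 keys then new rcts_2 keys) and computes each output entry directly from the three input dicts in one comprehension per output.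
import Mathlib
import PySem

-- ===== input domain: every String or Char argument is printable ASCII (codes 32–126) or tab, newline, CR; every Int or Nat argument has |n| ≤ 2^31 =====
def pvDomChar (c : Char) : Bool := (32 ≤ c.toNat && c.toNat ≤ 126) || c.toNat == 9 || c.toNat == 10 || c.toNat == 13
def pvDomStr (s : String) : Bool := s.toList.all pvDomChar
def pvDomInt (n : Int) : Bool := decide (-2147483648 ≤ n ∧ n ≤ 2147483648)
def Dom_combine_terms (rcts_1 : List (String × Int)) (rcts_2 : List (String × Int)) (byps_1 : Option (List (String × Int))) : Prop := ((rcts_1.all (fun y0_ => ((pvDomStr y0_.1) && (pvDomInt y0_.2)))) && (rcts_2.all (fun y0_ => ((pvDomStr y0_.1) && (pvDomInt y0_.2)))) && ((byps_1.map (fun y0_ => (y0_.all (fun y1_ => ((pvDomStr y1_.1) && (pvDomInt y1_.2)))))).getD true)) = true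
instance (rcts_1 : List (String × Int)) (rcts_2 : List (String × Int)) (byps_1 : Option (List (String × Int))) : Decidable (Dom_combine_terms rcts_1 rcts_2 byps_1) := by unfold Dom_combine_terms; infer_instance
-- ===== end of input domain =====

-- B materialises no intermediate dict and performs no mutation: each output entry is computed
-- directly from the three input dicts over a streamed key order; same return value (objective: simpler).

-- ===== PORT A =====
-- A-side helper: the body of A's third loop ('for r in list(iter(new_rcts)): …'),
-- one step of the fold over the snapshot of new_rcts's keys, state = (new_rcts, new_byps).
def ctCancel (st : PySem.Dict String Int × PySem.Dict String Int) (r : String) :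
    PySem.Dict String Int × PySem.Dict String Int :=
  if st.2.contains r then
    if st.1.getD r 0 > st.2.getD r 0 then
      (st.1.insert r (st.1.getD r 0 - st.2.getD r 0), st.2.erase r)
    else if st.1.getD r 0 < st.2.getD r 0 then
      (st.1.erase r, st.2.insert r (st.2.getD r 0 - st.1.getD r 0))
    else
      (st.1.erase r, st.2.erase r)
  else st

def combine_terms (rcts_1 : List (String × Int)) (rcts_2 : List (String × Int)) (byps_1 : Option (List (String × Int))) : (List (String × Int)) × (List (String × Int)) :=
  let r1 := PySem.Dict.ofList rcts_1
  let r2 := PySem.Dict.ofList rcts_2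
  -- new_byps = {} if byps_1 is None else {b: byps_1[b] for b in byps_1}
  let new_byps : PySem.Dict String Int :=
    match byps_1 with
    | none => PySem.Dict.empty
    | some b =>
      let bd := PySem.Dict.ofList b
      bd.keys.foldl (fun d k => d.insert k (bd.getD k 0)) PySem.Dict.empty
  -- for rct in rcts_1: new_rcts[rct] = rcts_1[rct] + rcts_2.get(rct, 0)
  let new_rcts := r1.keys.foldl (fun d k => d.insert k (r1.getD k 0 + r2.getD k 0)) PySem.Dict.empty
  -- for rct in rcts_2: if rct not in new_rcts: new_rcts[rct] = rcts_2[rct]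
  let new_rcts2 := r2.keys.foldl (fun d k => if d.contains k then d else d.insert k (r2.getD k 0)) new_rcts
  -- for r in list(iter(new_rcts)): … (snapshot of the keys, state mutated in place)
  let final := new_rcts2.keys.foldl ctCancel (new_rcts2, new_byps)
  (final.1.items, final.2.items)

-- ===== PORT B =====
def combine_terms_alt (rcts_1 : List (String × Int)) (rcts_2 : List (String × Int)) (byps_1 : Option (List (String × Int))) : (List (String × Int)) × (List (String × Int)) :=
  let r1 := PySem.Dict.ofList rcts_1
  let r2 := PySem.Dict.ofList rcts_2
  -- byps = {} if byps_1 is None else byps_1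
  let byps : PySem.Dict String Int :=
    match byps_1 with
    | none => PySem.Dict.empty
    | some b => PySem.Dict.ofList b
  -- def m(k): return rcts_1.get(k, 0) + rcts_2.get(k, 0)
  let m := fun k => r1.getD k 0 + r2.getD k 0
  -- rct_keys = list(rcts_1) + [k for k in rcts_2 if k not in rcts_1]
  let rct_keys := r1.keys ++ r2.keys.filter (fun k => !r1.contains k)
  -- the two dict comprehensions: their key streams are duplicate-free, so each
  -- comprehension's item list is exactly the filterMap of its stream (exact here)
  let new_rcts := rct_keys.filterMap (fun k =>
      if !byps.contains k || m k > byps.getD k 0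
      then some (k, m k - byps.getD k 0) else none)
  let new_byps := byps.items.filterMap (fun p =>
      if (!r1.contains p.1 && !r2.contains p.1) || p.2 > m p.1
      then some (p.1, p.2 - m p.1) else none)
  (new_rcts, new_byps)

-- ===== PRECONDITION & SPEC =====
def Spec_combine_terms (rcts_1 : List (String × Int)) (rcts_2 : List (String × Int)) (byps_1 : Option (List (String × Int))) (out : (List (String × Int)) × (List (String × Int))) : Prop := out = combine_terms_alt rcts_1 rcts_2 byps_1
instance (rcts_1 : List (String × Int)) (rcts_2 : List (String × Int)) (byps_1 : Option (List (String × Int))) (out : (List (String × Int)) × (List (String × Int))) : Decidable (Spec_combine_terms rcts_1 rcts_2 byps_1 out) := by unfold Spec_combine_terms; infer_instance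

-- ===== CLAIM (what is proved, stated in full; the proofs are below) =====
def Claim_equal_combine_terms : Prop := ∀ (rcts_1 : List (String × Int)) (rcts_2 : List (String × Int)) (byps_1 : Option (List (String × Int))), Dom_combine_terms rcts_1 rcts_2 byps_1 → Spec_combine_terms rcts_1 rcts_2 byps_1 (combine_terms rcts_1 rcts_2 byps_1)

-- ===== LEMMAS AND PROOFS =====

-- erase's items are a filter of the original items (definitional)
theorem items_erase (d : PySem.Dict String Int) (k : String) :
    (d.erase k).items = d.items.filter (fun p => !(p.1 == k)) := rfl

theorem nodup_keys_erase (d : PySem.Dict String Int) (k : String) (h : d.keys.Nodup) :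
    (d.erase k).keys.Nodup := by
  have : (d.erase k).keys.Sublist d.keys :=
    List.Sublist.map Prod.fst (List.filter_sublist)
  exact this.nodup h

theorem get?_erase_of_ne (d : PySem.Dict String Int) {j k : String} (h : j ≠ k) :
    (d.erase k).get? j = d.get? j := by
  obtain ⟨l⟩ := d
  simp only [PySem.Dict.get?, items_erase]
  congr 1
  induction l with
  | nil => rfl
  | cons p rest ih =>
    by_cases hk : p.1 = k
    · have hp : (p.1 == j) = false := by
        simp only [beq_eq_false_iff_ne]; rw [hk]; exact fun hh => h hh.symm
      rw [List.filter_cons_of_neg (by simp [hk]), List.find?_cons_of_neg (by simp [hp]), ih]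
    · by_cases hp : p.1 = j
      · rw [List.filter_cons_of_pos (by simp [hk]), List.find?_cons_of_pos (by simp [hp]),
          List.find?_cons_of_pos (by simp [hp])]
      · rw [List.filter_cons_of_pos (by simp [hk]), List.find?_cons_of_neg (by simp [hp]),
          List.find?_cons_of_neg (by simp [hp]), ih]

theorem contains_erase_of_ne (d : PySem.Dict String Int) {j k : String} (h : j ≠ k) :
    (d.erase k).contains j = d.contains j := by
  rw [PySem.Dict.contains_eq_isSome_get?, PySem.Dict.contains_eq_isSome_get?,
    get?_erase_of_ne d h]

theorem getD_erase_of_ne (d : PySem.Dict String Int) {j k : String} (h : j ≠ k) :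
    (d.erase k).getD j 0 = d.getD j 0 := by
  simp [PySem.Dict.getD, get?_erase_of_ne d h]

theorem pair_eta_of_mem (d : PySem.Dict String Int) {q : String × Int} (hq : q ∈ d.items)
    (h : d.keys.Nodup) : d.getD q.1 0 = q.2 :=
  PySem.Dict.getD_of_mem_items d (by simpa using hq) h 0

-- the cancellation loop, characterised: over distinct keys L, all present in nr,
-- the final dicts are pointwise filters/updates of the initial ones
theorem cancel_loop_spec (L : List String) (nr nb : PySem.Dict String Int)
    (hL : L.Nodup) (hnr : nr.keys.Nodup) (hnb : nb.keys.Nodup)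
    (hmem : ∀ k ∈ L, nr.contains k = true) :
    (L.foldl ctCancel (nr, nb)).1.items
      = nr.items.filterMap (fun p => if p.1 ∈ L ∧ nb.contains p.1 = true then
          (if p.2 > nb.getD p.1 0 then some (p.1, p.2 - nb.getD p.1 0) else none) else some p)
    ∧ (L.foldl ctCancel (nr, nb)).2.items
      = nb.items.filterMap (fun p => if p.1 ∈ L then
          (if p.2 > nr.getD p.1 0 then some (p.1, p.2 - nr.getD p.1 0) else none) else some p) := by
  induction L generalizing nr nb with
  | nil => constructor <;> simp
  | cons k rest ih =>
    have hknr : nr.contains k = true := hmem k (List.mem_cons_self)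
    have hkrest : k ∉ rest := (List.nodup_cons.mp hL).1
    have hrest : rest.Nodup := (List.nodup_cons.mp hL).2
    rw [List.foldl_cons]
    by_cases hc : nb.contains k = true
    · rcases lt_trichotomy (nr.getD k 0) (nb.getD k 0) with hlt | heq | hgt
      · -- r < b : nr loses k, nb keeps k with b - r
        have hng : ¬ (nr.getD k 0 > nb.getD k 0) := not_lt.mpr (le_of_lt hlt)
        have hstep : ctCancel (nr, nb) k
            = (nr.erase k, nb.insert k (nb.getD k 0 - nr.getD k 0)) := by
          simp [ctCancel, hc, hlt, hng]
        rw [hstep]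
        obtain ⟨ih1, ih2⟩ := ih (nr.erase k) (nb.insert k (nb.getD k 0 - nr.getD k 0)) hrest
          (nodup_keys_erase _ _ hnr) (PySem.Dict.nodup_keys_insert _ _ _ hnb)
          (fun j hj => by
            have hjk : j ≠ k := fun hh => hkrest (hh ▸ hj)
            rw [contains_erase_of_ne nr hjk]
            exact hmem j (List.mem_cons_of_mem _ hj))
        constructor
        · rw [ih1, items_erase, List.filterMap_filter]
          apply List.filterMap_congr; intro p hp
          by_cases hpk : p.1 = k
          · have hp2 : p.2 = nr.getD k 0 := (hpk ▸ (pair_eta_of_mem nr hp hnr)).symm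
            have hnb2 : ¬ (p.2 > nb.getD p.1 0) := by rw [hpk, hp2]; omega
            simp [hpk, hc, hnb2]
            try omega
          · have e1 : (nb.insert k (nb.getD k 0 - nr.getD k 0)).contains p.1 = nb.contains p.1 := by
              rw [PySem.Dict.contains_insert]; simp [hpk]
            have e2 : (nb.insert k (nb.getD k 0 - nr.getD k 0)).getD p.1 0 = nb.getD p.1 0 :=
              PySem.Dict.getD_insert_of_ne nb _ _ hpk
            simp [hpk, e1, e2, List.mem_cons]
        · rw [ih2, PySem.Dict.items_insert_of_contains _ _ hc, List.filterMap_map]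
          apply List.filterMap_congr; intro p hp
          by_cases hpk : p.1 = k
          · have hp2 : p.2 = nb.getD k 0 := (hpk ▸ (pair_eta_of_mem nb hp hnb)).symm
            simp only [Function.comp_def, hpk, beq_self_eq_true, if_true]
            have hfst : (k, nb.getD k 0 - nr.getD k 0).1 ∉ rest := hkrest
            simp [hfst, hpk, hp2, hlt, List.mem_cons]
            try omega
          · have e2 : (nr.erase k).getD p.1 0 = nr.getD p.1 0 := getD_erase_of_ne nr hpk
            have hbeq : (p.1 == k) = false := by simp [hpk]
            simp [Function.comp_def, hbeq, hpk, e2, List.mem_cons]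
      · -- r = b : both lose k
        have hng : ¬ (nr.getD k 0 > nb.getD k 0) := by rw [heq]; exact lt_irrefl _
        have hnl : ¬ (nr.getD k 0 < nb.getD k 0) := by rw [heq]; exact lt_irrefl _
        have hstep : ctCancel (nr, nb) k = (nr.erase k, nb.erase k) := by
          simp [ctCancel, hc, hng, hnl]
        rw [hstep]
        obtain ⟨ih1, ih2⟩ := ih (nr.erase k) (nb.erase k) hrest
          (nodup_keys_erase _ _ hnr) (nodup_keys_erase _ _ hnb)
          (fun j hj => by
            have hjk : j ≠ k := fun hh => hkrest (hh ▸ hj)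
            rw [contains_erase_of_ne nr hjk]
            exact hmem j (List.mem_cons_of_mem _ hj))
        constructor
        · rw [ih1, items_erase, List.filterMap_filter]
          apply List.filterMap_congr; intro p hp
          by_cases hpk : p.1 = k
          · have hp2 : p.2 = nr.getD k 0 := (hpk ▸ (pair_eta_of_mem nr hp hnr)).symm
            have hnb2 : ¬ (p.2 > nb.getD p.1 0) := by rw [hpk, hp2]; omega
            simp [hpk, hc, hnb2]
            try omega
          · have e1 : (nb.erase k).contains p.1 = nb.contains p.1 := contains_erase_of_ne nb hpk
            have e2 : (nb.erase k).getD p.1 0 = nb.getD p.1 0 := getD_erase_of_ne nb hpk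
            simp [hpk, e1, e2, List.mem_cons]
        · rw [ih2, items_erase, List.filterMap_filter]
          apply List.filterMap_congr; intro p hp
          by_cases hpk : p.1 = k
          · have hp2 : p.2 = nb.getD k 0 := (hpk ▸ (pair_eta_of_mem nb hp hnb)).symm
            have hnr2 : ¬ (p.2 > nr.getD p.1 0) := by rw [hpk, hp2]; omega
            simp [hpk, hnr2]
            try omega
          · have e2 : (nr.erase k).getD p.1 0 = nr.getD p.1 0 := getD_erase_of_ne nr hpk
            simp [hpk, e2, List.mem_cons]
      · -- r > b : nr keeps k with r - b, nb loses k
        have hstep : ctCancel (nr, nb) k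
            = (nr.insert k (nr.getD k 0 - nb.getD k 0), nb.erase k) := by
          simp [ctCancel, hc, hgt]
        rw [hstep]
        obtain ⟨ih1, ih2⟩ := ih (nr.insert k (nr.getD k 0 - nb.getD k 0)) (nb.erase k) hrest
          (PySem.Dict.nodup_keys_insert _ _ _ hnr) (nodup_keys_erase _ _ hnb)
          (fun j hj => by
            rw [PySem.Dict.contains_insert, hmem j (List.mem_cons_of_mem _ hj)]; simp)
        constructor
        · rw [ih1, PySem.Dict.items_insert_of_contains _ _ hknr, List.filterMap_map]
          apply List.filterMap_congr; intro p hp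
          by_cases hpk : p.1 = k
          · have hp2 : p.2 = nr.getD k 0 := (hpk ▸ (pair_eta_of_mem nr hp hnr)).symm
            simp only [Function.comp_def, hpk, beq_self_eq_true, if_true]
            have hfst : (k, nr.getD k 0 - nb.getD k 0).1 ∉ rest := hkrest
            simp [hfst, hpk, hp2, hc, hgt, List.mem_cons]
            try omega
          · have e1 : (nb.erase k).contains p.1 = nb.contains p.1 := contains_erase_of_ne nb hpk
            have e2 : (nb.erase k).getD p.1 0 = nb.getD p.1 0 := getD_erase_of_ne nb hpk
            have hbeq : (p.1 == k) = false := by simp [hpk]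
            simp [Function.comp_def, hbeq, hpk, e1, e2, List.mem_cons]
        · rw [ih2, items_erase, List.filterMap_filter]
          apply List.filterMap_congr; intro p hp
          by_cases hpk : p.1 = k
          · have hp2 : p.2 = nb.getD k 0 := (hpk ▸ (pair_eta_of_mem nb hp hnb)).symm
            have hnr2 : ¬ (p.2 > nr.getD p.1 0) := by rw [hpk, hp2]; omega
            simp [hpk, hnr2]
            try omega
          · have e2 : (nr.insert k (nr.getD k 0 - nb.getD k 0)).getD p.1 0 = nr.getD p.1 0 :=
              PySem.Dict.getD_insert_of_ne nr _ _ hpk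
            simp [hpk, e2, List.mem_cons]
    · -- k not in byps : nothing happens
      have hc' : nb.contains k = false := by simpa using hc
      have hstep : ctCancel (nr, nb) k = (nr, nb) := by simp [ctCancel, hc']
      rw [hstep]
      obtain ⟨ih1, ih2⟩ := ih nr nb hrest hnr hnb
        (fun j hj => hmem j (List.mem_cons_of_mem _ hj))
      constructor
      · rw [ih1]
        apply List.filterMap_congr; intro p hp
        by_cases hpk : p.1 = k
        · simp [hpk, hkrest, hc']
        · simp [hpk, List.mem_cons]
      · rw [ih2]
        apply List.filterMap_congr; intro p hp
        have hpk : p.1 ≠ k := by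
          intro hh
          have := PySem.Dict.mem_keys_of_mem_items nb hp
          rw [hh] at this
          rw [(PySem.Dict.contains_iff_mem_keys nb k).mpr this] at hc'
          simp at hc'
        simp [hpk, List.mem_cons]

-- the byps-copy loop of A copies the dict
theorem copy_loop_eq (bd : PySem.Dict String Int) (h : bd.keys.Nodup) :
    bd.keys.foldl (fun d k => d.insert k (bd.getD k 0)) PySem.Dict.empty = bd := by
  apply PySem.Dict.ext
  rw [PySem.Dict.items_foldl_insert_fresh bd.keys (fun a => a) (fun a => bd.getD a 0)
    PySem.Dict.empty (fun a _ => PySem.Dict.contains_empty a) (by simpa using h)]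
  have hk : bd.keys = bd.items.map Prod.fst := rfl
  rw [show PySem.Dict.empty.items = ([] : List (String × Int)) from rfl, List.nil_append,
    hk, List.map_map]
  conv_rhs => rw [← List.map_id bd.items]
  apply List.map_congr_left
  intro p hp
  simp [Function.comp_def, pair_eta_of_mem bd hp h]

-- A's first loop: fresh inserts over r1's keys
theorem step1_items (r1 r2 : PySem.Dict String Int) (h1 : r1.keys.Nodup) :
    (r1.keys.foldl (fun d k => d.insert k (r1.getD k 0 + r2.getD k 0)) PySem.Dict.empty).items
      = r1.items.map (fun p => (p.1, p.2 + r2.getD p.1 0)) := by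
  rw [PySem.Dict.items_foldl_insert_fresh r1.keys (fun a => a)
    (fun a => r1.getD a 0 + r2.getD a 0)
    PySem.Dict.empty (fun a _ => PySem.Dict.contains_empty a) (by simpa using h1)]
  have hk : r1.keys = r1.items.map Prod.fst := rfl
  rw [show PySem.Dict.empty.items = ([] : List (String × Int)) from rfl, List.nil_append,
    hk, List.map_map]
  apply List.map_congr_left
  intro p hp
  simp [Function.comp_def, pair_eta_of_mem r1 hp h1]

-- A's second loop: conditional fresh inserts
theorem cond_insert_items (L : List String) (f : String → Int) (d : PySem.Dict String Int)
    (hL : L.Nodup) :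
    (L.foldl (fun d k => if d.contains k then d else d.insert k (f k)) d).items
      = d.items ++ (L.filter (fun k => !d.contains k)).map (fun k => (k, f k)) := by
  induction L generalizing d with
  | nil => simp
  | cons k rest ih =>
    have hkrest : k ∉ rest := (List.nodup_cons.mp hL).1
    have hrest : rest.Nodup := (List.nodup_cons.mp hL).2
    rw [List.foldl_cons]
    by_cases hc : d.contains k = true
    · rw [if_pos hc, ih d hrest, List.filter_cons]
      simp [hc]
    · have hc' : d.contains k = false := by simpa using hc
      rw [if_neg (by simp [hc']), ih (d.insert k (f k)) hrest,
        PySem.Dict.items_insert_of_not_contains d (f k) hc', List.filter_cons]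
      have hfc : rest.filter (fun j => !(d.insert k (f k)).contains j)
          = rest.filter (fun j => !d.contains j) := by
        apply List.filter_congr
        intro j hj
        rw [PySem.Dict.contains_insert]
        have : j ≠ k := fun hh => hkrest (hh ▸ hj)
        simp [this]
      rw [hfc]
      simp [hc', List.append_assoc]

-- A's first two loops build the merged dict; its items are B's key stream paired with m
theorem merged_items (rcts_1 rcts_2 : List (String × Int)) :
    ((PySem.Dict.ofList rcts_2).keys.foldl
        (fun d k => if d.contains k then d
          else d.insert k ((PySem.Dict.ofList rcts_2).getD k 0))
        ((PySem.Dict.ofList rcts_1).keys.foldl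
          (fun d k => d.insert k ((PySem.Dict.ofList rcts_1).getD k 0 + (PySem.Dict.ofList rcts_2).getD k 0))
          PySem.Dict.empty)).items
    = ((PySem.Dict.ofList rcts_1).keys
        ++ (PySem.Dict.ofList rcts_2).keys.filter (fun k => !(PySem.Dict.ofList rcts_1).contains k)).map
        (fun k => (k, (PySem.Dict.ofList rcts_1).getD k 0 + (PySem.Dict.ofList rcts_2).getD k 0)) := by
  set r1 := PySem.Dict.ofList rcts_1 with hr1
  set r2 := PySem.Dict.ofList rcts_2 with hr2
  have h1 : r1.keys.Nodup := PySem.Dict.nodup_keys_ofList rcts_1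
  have h2 : r2.keys.Nodup := PySem.Dict.nodup_keys_ofList rcts_2
  have hcont : ∀ k, ((r1.keys.foldl (fun d k => d.insert k (r1.getD k 0 + r2.getD k 0)) PySem.Dict.empty)).contains k
      = r1.contains k := by
    intro k
    show ((r1.keys.foldl (fun d k => d.insert k (r1.getD k 0 + r2.getD k 0)) PySem.Dict.empty)).items.any (fun p => p.1 == k)
      = r1.items.any (fun p => p.1 == k)
    rw [step1_items r1 r2 h1, List.any_map]
    rfl
  rw [cond_insert_items r2.keys (fun k => r2.getD k 0) _ h2, step1_items r1 r2 h1,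
    List.map_append]
  congr 1
  · have hk : r1.keys = r1.items.map Prod.fst := rfl
    rw [hk, List.map_map]
    apply List.map_congr_left
    intro p hp
    simp [Function.comp_def, pair_eta_of_mem r1 hp h1]
  · rw [List.filter_congr (fun k _ => by rw [hcont k])]
    apply List.map_congr_left
    intro k hk
    have hnc : r1.contains k = false := by
      have := (List.mem_filter.mp hk).2; simpa using this
    rw [PySem.Dict.getD_of_not_contains r1 0 hnc]
    simp

-- the merged key stream is duplicate-free
theorem nodup_rct_keys (r1 r2 : PySem.Dict String Int)
    (h1 : r1.keys.Nodup) (h2 : r2.keys.Nodup) :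
    (r1.keys ++ r2.keys.filter (fun k => !r1.contains k)).Nodup := by
  refine List.Nodup.append h1 (List.Nodup.filter _ h2) ?_
  intro a ha hb
  have := (List.mem_filter.mp hb).2
  rw [(PySem.Dict.contains_iff_mem_keys r1 a).mpr ha] at this
  simp at this

-- the whole pipeline, for an arbitrary byproduct dict B0 with distinct keys
theorem bridge (rcts_1 rcts_2 : List (String × Int)) (B0 : PySem.Dict String Int)
    (hB0nd : B0.keys.Nodup) (M : PySem.Dict String Int)
    (hMdef : M = (PySem.Dict.ofList rcts_2).keys.foldl
        (fun d k => if d.contains k then d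
          else d.insert k ((PySem.Dict.ofList rcts_2).getD k 0))
        ((PySem.Dict.ofList rcts_1).keys.foldl
          (fun d k => d.insert k ((PySem.Dict.ofList rcts_1).getD k 0 + (PySem.Dict.ofList rcts_2).getD k 0))
          PySem.Dict.empty)) :
    ((M.keys.foldl ctCancel (M, B0)).1.items, (M.keys.foldl ctCancel (M, B0)).2.items)
    = (((PySem.Dict.ofList rcts_1).keys
          ++ (PySem.Dict.ofList rcts_2).keys.filter (fun k => !(PySem.Dict.ofList rcts_1).contains k)).filterMap
          (fun k =>
            if !B0.contains k || (PySem.Dict.ofList rcts_1).getD k 0 + (PySem.Dict.ofList rcts_2).getD k 0 > B0.getD k 0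
            then some (k, (PySem.Dict.ofList rcts_1).getD k 0 + (PySem.Dict.ofList rcts_2).getD k 0 - B0.getD k 0) else none),
       B0.items.filterMap (fun p =>
            if (!(PySem.Dict.ofList rcts_1).contains p.1 && !(PySem.Dict.ofList rcts_2).contains p.1)
              || p.2 > (PySem.Dict.ofList rcts_1).getD p.1 0 + (PySem.Dict.ofList rcts_2).getD p.1 0
            then some (p.1, p.2 - ((PySem.Dict.ofList rcts_1).getD p.1 0 + (PySem.Dict.ofList rcts_2).getD p.1 0)) else none)) := by
  set r1 := PySem.Dict.ofList rcts_1 with hr1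
  set r2 := PySem.Dict.ofList rcts_2 with hr2
  have h1 : r1.keys.Nodup := PySem.Dict.nodup_keys_ofList rcts_1
  have h2 : r2.keys.Nodup := PySem.Dict.nodup_keys_ofList rcts_2
  set rk := r1.keys ++ r2.keys.filter (fun k => !r1.contains k) with hrk
  have hrknd : rk.Nodup := nodup_rct_keys r1 r2 h1 h2
  have hMitems : M.items = rk.map (fun k => (k, r1.getD k 0 + r2.getD k 0)) := by
    rw [hMdef]; exact merged_items rcts_1 rcts_2
  have hMkeys : M.keys = rk := by
    show M.items.map Prod.fst = rk
    rw [hMitems, List.map_map]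
    simp [Function.comp_def]
  have hMnd : M.keys.Nodup := by rw [hMkeys]; exact hrknd
  have hMcont : ∀ k, M.contains k = (r1.contains k || r2.contains k) := by
    intro k
    have hiff : M.contains k = true ↔ (r1.contains k || r2.contains k) = true := by
      rw [PySem.Dict.contains_iff_mem_keys, hMkeys, hrk]
      simp only [List.mem_append, List.mem_filter, Bool.or_eq_true,
        ← PySem.Dict.contains_iff_mem_keys]
      constructor
      · rintro (h | ⟨h, _⟩)
        · exact Or.inl h
        · exact Or.inr h
      · rintro (h | h)
        · exact Or.inl h
        · by_cases hc : r1.contains k = true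
          · exact Or.inl hc
          · exact Or.inr ⟨h, by simpa using hc⟩
    cases hb : (r1.contains k || r2.contains k)
    · cases hm : M.contains k
      · rfl
      · exact absurd (hiff.mp hm) (by simp [hb])
    · exact hiff.mpr hb
  have hMgetD : ∀ k, M.getD k 0 = r1.getD k 0 + r2.getD k 0 := by
    intro k
    by_cases hc : M.contains k = true
    · have hk : k ∈ rk := by
        rw [← hMkeys]; exact (PySem.Dict.contains_iff_mem_keys M k).mp hc
      have hmem : (k, r1.getD k 0 + r2.getD k 0) ∈ M.items := by
        rw [hMitems]; exact List.mem_map_of_mem hk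
      exact PySem.Dict.getD_of_mem_items M hmem hMnd 0
    · have hc' : M.contains k = false := by simpa using hc
      have hb : (r1.contains k || r2.contains k) = false := by rw [← hMcont]; exact hc'
      have hb1 : r1.contains k = false := by
        cases h : r1.contains k; rfl; rw [h] at hb; simp at hb
      have hb2 : r2.contains k = false := by
        cases h : r2.contains k; rfl; rw [h] at hb; simp at hb
      rw [PySem.Dict.getD_of_not_contains M 0 hc',
        PySem.Dict.getD_of_not_contains r1 0 hb1,
        PySem.Dict.getD_of_not_contains r2 0 hb2]
      simp
  obtain ⟨hA1, hA2⟩ := cancel_loop_spec M.keys M B0 hMnd hMnd hB0nd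
    (fun k hk => (PySem.Dict.contains_iff_mem_keys M k).mpr hk)
  rw [hA1, hA2]
  simp only [Prod.mk.injEq]
  constructor
  · -- first component
    rw [hMitems, List.filterMap_map]
    apply List.filterMap_congr
    intro k hk
    have hkM : k ∈ M.keys := by rw [hMkeys]; exact hk
    by_cases hc : B0.contains k = true
    · simp [Function.comp_def, hkM, hc]
    · have hc' : B0.contains k = false := by simpa using hc
      have hg : B0.getD k 0 = 0 := PySem.Dict.getD_of_not_contains B0 0 hc'
      simp [Function.comp_def, hkM, hc', hg]
  · -- second component
    apply List.filterMap_congr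
    intro p hp
    rw [hMgetD p.1]
    by_cases hc : M.contains p.1 = true
    · have hk : p.1 ∈ M.keys := (PySem.Dict.contains_iff_mem_keys M p.1).mp hc
      have hb : (r1.contains p.1 || r2.contains p.1) = true := by rw [← hMcont]; exact hc
      have hband : (!r1.contains p.1 && !r2.contains p.1) = false := by
        cases h1c : r1.contains p.1 <;> cases h2c : r2.contains p.1 <;>
          simp [h1c, h2c] at hb ⊢
      simp [hk, hband]
    · have hc' : M.contains p.1 = false := by simpa using hc
      have hk : p.1 ∉ M.keys := fun hh => by
        rw [(PySem.Dict.contains_iff_mem_keys M p.1).mpr hh] at hc'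
        simp at hc'
      have hb : (r1.contains p.1 || r2.contains p.1) = false := by rw [← hMcont]; exact hc'
      have hb1 : r1.contains p.1 = false := by
        cases h : r1.contains p.1; rfl; rw [h] at hb; simp at hb
      have hb2 : r2.contains p.1 = false := by
        cases h : r2.contains p.1; rfl; rw [h] at hb; simp at hb
      rw [PySem.Dict.getD_of_not_contains r1 0 hb1, PySem.Dict.getD_of_not_contains r2 0 hb2]
      simp [hk, hb1, hb2]

-- ===== VERDICT (by name: the statement is the Claim_ definition above) =====
theorem combine_terms_spec : Claim_equal_combine_terms := by
  intro rcts_1 rcts_2 byps_1 _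
  unfold Spec_combine_terms
  cases byps_1 with
  | none =>
    simp only [combine_terms, combine_terms_alt]
    exact bridge rcts_1 rcts_2 PySem.Dict.empty PySem.Dict.nodup_keys_empty _ rfl
  | some b =>
    simp only [combine_terms, combine_terms_alt]
    rw [copy_loop_eq (PySem.Dict.ofList b) (PySem.Dict.nodup_keys_ofList b)]
    exact bridge rcts_1 rcts_2 (PySem.Dict.ofList b) (PySem.Dict.nodup_keys_ofList b) _ rfl
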